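-- pv_equiv track=rewrite | github.com/GundalaNikhil/DSA | dsa-problems/Bitwise/testcases/comprehensive_generator.py | sol_016
-- ===== SOURCE A (Python) =====
-- from typing import List, Tuple
--
-- def sol_016(a: List[int], K: int) -> int:
--     """BIT-016: Max Bitwise OR Subarray <= K"""
--     n = len(a)
--     max_len = 0
--     for i in range(n):
--         current_or = 0
--         for j in range(i, n):
--             current_or |= a[j]
--             if current_or <= K:
--                 max_len = max(max_len, j - i + 1)
--             else:
--                 break
--     return max_len
-- ===== SOURCE B (Python) =====
-- from typing import List
--
-- def sol_016(a: List[int], K: int) -> int: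
--     """BIT-016: Max Bitwise OR Subarray <= K.
--
--     One left-to-right pass over end positions, carrying the list of
--     (running OR, window length) for every still-valid start, longest first.
--     """
--     ors = []  # (or_value, window_length) for each surviving start, longest window first
--     best = 0
--     for x in a:
--         nxt = []
--         for v, L in ors:
--             w = v | x
--             if w <= K:
--                 nxt.append((w, L + 1))
--         if x <= K:
--             nxt.append((x, 1))
--         ors = nxt
--         if ors:
--             best = max(best, ors[0][1])
--     return best
-- ===== Notes on version B (the rewrite author's own statement) =====
-- stated objective: alternative
-- what changed: A restarts the OR accumulation from every start index (nested loops); B makes one left-to-right pass over end positions, carrying for every still-valid start its running OR and window length and reading the best window off the head of that list.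
import Mathlib
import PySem

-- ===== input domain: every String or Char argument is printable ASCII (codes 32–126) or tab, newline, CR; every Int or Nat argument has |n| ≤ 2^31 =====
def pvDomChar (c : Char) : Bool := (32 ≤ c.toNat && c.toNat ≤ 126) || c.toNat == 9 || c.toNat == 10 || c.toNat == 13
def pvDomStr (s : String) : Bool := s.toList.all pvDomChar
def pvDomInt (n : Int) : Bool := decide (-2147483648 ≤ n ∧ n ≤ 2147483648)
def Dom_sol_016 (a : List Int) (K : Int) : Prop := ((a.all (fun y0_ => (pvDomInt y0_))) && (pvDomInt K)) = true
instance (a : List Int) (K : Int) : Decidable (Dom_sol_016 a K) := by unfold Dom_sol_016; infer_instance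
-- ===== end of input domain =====

-- B replaces A's per-start rescan (restart the OR from every i) by one left-to-right pass
-- that carries, for every still-valid start, its running OR and window length (alternative algorithm).


-- ===== PORT A =====
-- inner loop 'for j in range(i, n)' of A: walks a[i:] carrying current_or, the current
-- length j - i + 1 and max_len; 'break' = returning m.
def pvInnerA (K : Int) : List Int → Int → Int → Int → Int
  | [], _, _, m => m
  | x :: rest, cur, len, m =>
      let cur' := PySem.Int.bor cur x
      if cur' ≤ K then pvInnerA K rest cur' (len + 1) (max m (len + 1)) else m

def sol_016 (a : List Int) (K : Int) : Int :=
  (List.range a.length).foldl (fun m i => pvInnerA K (a.drop i) 0 0 m) 0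

-- ===== PORT B =====
-- B's inner 'for v, L in ors' append loop plus the trailing 'if x <= K' append.
def pvStepB (K : Int) (ors : List (Int × Int)) (x : Int) : List (Int × Int) :=
  (ors.filterMap (fun p =>
      if PySem.Int.bor p.1 x ≤ K then some (PySem.Int.bor p.1 x, p.2 + 1) else none))
    ++ (if x ≤ K then [(x, 1)] else [])

def sol_016_alt (a : List Int) (K : Int) : Int :=
  (a.foldl (fun (s : List (Int × Int) × Int) x =>
      let nxt := pvStepB K s.1 x
      (nxt, match nxt with
            | [] => s.2
            | (_, L) :: _ => max s.2 L)) ([], 0)).2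

-- ===== PRECONDITION & SPEC =====
def Spec_sol_016 (a : List Int) (K : Int) (out : Int) : Prop := out = sol_016_alt a K
instance (a : List Int) (K : Int) (out : Int) : Decidable (Spec_sol_016 a K out) := by unfold Spec_sol_016; infer_instance

-- ===== CLAIM (what is proved, stated in full; the proofs are below) =====
def Claim_equal_sol_016 : Prop := ∀ (a : List Int) (K : Int), Dom_sol_016 a K → Spec_sol_016 a K (sol_016 a K)

-- ===== LEMMAS AND PROOFS =====

-- 'every running OR from cur through a prefix of the list stays ≤ K'
def pvGood (K : Int) : Int → List Int → Bool
  | _, [] => true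
  | cur, x :: r => decide (PySem.Int.bor cur x ≤ K) && pvGood K (PySem.Int.bor cur x) r

-- length of the longest good prefix (where A's inner loop stops)
def pvChain (K : Int) : Int → List Int → Nat
  | _, [] => 0
  | cur, x :: r => if PySem.Int.bor cur x ≤ K then pvChain K (PySem.Int.bor cur x) r + 1 else 0

def pvOrAcc (cur : Int) (t : List Int) : Int := t.foldl PySem.Int.bor cur

-- reference value of B's list state after processing p
def pvEstate (K : Int) (p : List Int) : List (Int × Int) :=
  (List.range p.length).filterMap (fun l =>
    if pvGood K 0 (p.drop l) then some (pvOrAcc 0 (p.drop l), ((p.length : Int) - (l : Int))) else none)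

-- head length of B's state = longest good suffix length
def pvMgs (K : Int) (p : List Int) : Int :=
  match pvEstate K p with
  | [] => 0
  | (_, L) :: _ => L

-- reference value of B's best accumulator after processing p
def pvM (K : Int) (p : List Int) : Int :=
  (List.range p.length).foldl (fun m j => max m (pvMgs K (p.take (j + 1)))) 0

-- generic fold-max bounds
theorem pvFoldMax_init {α : Type} (f : α → Int) : ∀ (l : List α) (c : Int),
    c ≤ l.foldl (fun m i => max m (f i)) c := by
  intro l
  induction l with
  | nil => intro c; exact le_refl c
  | cons x t ih => intro c; exact le_trans (le_max_left c (f x)) (ih (max c (f x)))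

theorem pvFoldMax_mem {α : Type} (f : α → Int) (i : α) : ∀ (l : List α) (c : Int), i ∈ l →
    f i ≤ l.foldl (fun m i => max m (f i)) c := by
  intro l
  induction l with
  | nil => intro c h; cases h
  | cons x t ih =>
    intro c h
    rcases List.mem_cons.1 h with rfl | h
    · exact le_trans (le_max_right c (f i)) (pvFoldMax_init f t _)
    · exact ih _ h

theorem pvFoldMax_le {α : Type} (f : α → Int) (b : Int) : ∀ (l : List α) (c : Int),
    c ≤ b → (∀ i ∈ l, f i ≤ b) → l.foldl (fun m i => max m (f i)) c ≤ b := by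
  intro l
  induction l with
  | nil => intro c hc _; exact hc
  | cons x t ih =>
    intro c hc h
    exact ih _ (max_le hc (h x List.mem_cons_self)) (fun i hi => h i (List.mem_cons_of_mem _ hi))

theorem pvOrAcc_append (cur x : Int) (t : List Int) :
    pvOrAcc cur (t ++ [x]) = PySem.Int.bor (pvOrAcc cur t) x := by
  simp [pvOrAcc]

theorem pvGood_append (K x : Int) (t : List Int) : ∀ cur,
    pvGood K cur (t ++ [x]) = (pvGood K cur t && decide (PySem.Int.bor (pvOrAcc cur t) x ≤ K)) := by
  induction t with
  | nil => intro cur; simp [pvGood, pvOrAcc]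
  | cons y r ih =>
    intro cur
    simp only [List.cons_append, pvGood, ih, pvOrAcc, List.foldl_cons]
    rw [Bool.and_assoc]
    rfl

-- A's inner loop computes max m (len + chain)
theorem pvInnerA_eq (K : Int) : ∀ (s : List Int) (cur len m : Int), len ≤ m →
    pvInnerA K s cur len m = max m (len + (pvChain K cur s : Int)) := by
  intro s
  induction s with
  | nil => intro cur len m h; simp [pvInnerA, pvChain]; omega
  | cons x r ih =>
    intro cur len m h
    simp only [pvInnerA, pvChain]
    by_cases hx : PySem.Int.bor cur x ≤ K
    · simp only [hx, if_pos]
      rw [ih _ _ _ (le_max_right m (len + 1))]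
      have h0 : (0 : Int) ≤ (pvChain K (PySem.Int.bor cur x) r : Int) := Int.natCast_nonneg _
      push_cast
      omega
    · simp [hx]; omega

theorem pvChain_le_length (K : Int) : ∀ (s : List Int) (cur : Int), pvChain K cur s ≤ s.length := by
  intro s
  induction s with
  | nil => intro cur; simp [pvChain]
  | cons x r ih =>
    intro cur
    simp only [pvChain, List.length_cons]
    split
    · exact Nat.succ_le_succ (ih _)
    · omega

theorem pvGood_take_chain (K : Int) : ∀ (s : List Int) (cur : Int),
    pvGood K cur (s.take (pvChain K cur s)) = true := by
  intro s
  induction s with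
  | nil => intro cur; simp [pvChain, pvGood]
  | cons x r ih =>
    intro cur
    simp only [pvChain]
    by_cases hx : PySem.Int.bor cur x ≤ K
    · simp [hx, pvGood, ih]
    · simp [hx, pvGood]

theorem pvChain_ge (K : Int) : ∀ (s : List Int) (cur : Int) (m : Nat), m ≤ s.length →
    pvGood K cur (s.take m) = true → m ≤ pvChain K cur s := by
  intro s
  induction s with
  | nil => intro cur m h _; simp only [List.length_nil, Nat.le_zero] at h; simp [h]
  | cons x r ih =>
    intro cur m h hg
    cases m with
    | zero => omega
    | succ m' =>
      simp only [List.take_succ_cons, pvGood, Bool.and_eq_true, decide_eq_true_eq] at hg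
      simp only [pvChain, if_pos hg.1]
      exact Nat.succ_le_succ (ih _ m' (by simpa using h) hg.2)

-- one B step advances the reference state
theorem pvEstate_step (K x : Int) (p : List Int) :
    pvEstate K (p ++ [x]) = pvStepB K (pvEstate K p) x := by
  unfold pvEstate pvStepB
  rw [List.filterMap_filterMap]
  simp only [List.length_append, List.length_cons, List.length_nil]
  rw [List.range_succ, List.filterMap_append]
  congr 1
  · apply List.filterMap_congr
    intro l hl
    have hl' : l < p.length := List.mem_range.1 hl
    rw [List.drop_append_of_le_length (le_of_lt hl'), pvGood_append, pvOrAcc_append]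
    have hcast : ((p.length + (0 + 1) : Nat) : Int) - (l : Int) = ((p.length : Int) - (l : Int)) + 1 := by
      push_cast; omega
    by_cases hg : pvGood K 0 (p.drop l) = true
    · by_cases hle : PySem.Int.bor (pvOrAcc 0 (p.drop l)) x ≤ K
      · simp [hg, hle]
        omega
      · simp [hg, hle]
    · simp only [Bool.not_eq_true] at hg
      simp [hg]
  · simp only [List.filterMap_cons, List.filterMap_nil, List.drop_left]
    have hz : PySem.Int.bor 0 x = x := by
      rw [PySem.Int.bor_comm]; exact PySem.Int.bor_zero x
    have ho : pvOrAcc 0 [x] = x := by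
      unfold pvOrAcc
      simp only [List.foldl_cons, List.foldl_nil, hz]
    by_cases hx : x ≤ K
    · simp [pvGood, hx, hz, ho]
    · simp [pvGood, hx, hz]

theorem pvM_step (K x : Int) (p : List Int) :
    pvM K (p ++ [x]) = max (pvM K p) (pvMgs K (p ++ [x])) := by
  unfold pvM
  simp only [List.length_append, List.length_cons, List.length_nil]
  rw [List.range_succ, List.foldl_append]
  simp only [List.foldl_cons, List.foldl_nil]
  have h1 : (List.range p.length).foldl (fun m j => max m (pvMgs K ((p ++ [x]).take (j + 1)))) 0
       = (List.range p.length).foldl (fun m j => max m (pvMgs K (p.take (j + 1)))) 0 := by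
    apply PySem.List.foldl_congr_mem
    intro m j hj
    rw [List.take_append_of_le_length (by have := List.mem_range.1 hj; omega)]
  rw [h1]
  congr 1
  rw [List.take_of_length_le (by simp)]

-- the fold in sol_016_alt reaches exactly the reference state
theorem pvFoldB_eq (K : Int) (a : List Int) :
    a.foldl (fun (s : List (Int × Int) × Int) x =>
      let nxt := pvStepB K s.1 x
      (nxt, match nxt with
            | [] => s.2
            | (_, L) :: _ => max s.2 L)) ([], 0) = (pvEstate K a, pvM K a) := by
  induction a using List.reverseRecOn with
  | nil => simp [pvEstate, pvM]
  | append_singleton p x ih =>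
    rw [List.foldl_append]
    simp only [List.foldl_cons, List.foldl_nil, ih]
    rw [← pvEstate_step, pvM_step]
    have h0 : (0 : Int) ≤ pvM K p := pvFoldMax_init _ _ 0
    cases hE : pvEstate K (p ++ [x]) with
    | nil => simp [pvMgs, hE]; omega
    | cons e es => simp [pvMgs, hE]

-- every nonzero head of the reference state comes from a good suffix
theorem pvMgs_cases (K : Int) (p : List Int) :
    pvMgs K p = 0 ∨ ∃ l, l < p.length ∧ pvGood K 0 (p.drop l) = true ∧
      pvMgs K p = (p.length : Int) - (l : Int) := by
  cases hE : pvEstate K p with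
  | nil => left; simp [pvMgs, hE]
  | cons e es =>
    right
    have he : e ∈ pvEstate K p := by rw [hE]; exact List.mem_cons_self
    unfold pvEstate at he
    rcases List.mem_filterMap.1 he with ⟨l, hl, hfl⟩
    by_cases hg : pvGood K 0 (p.drop l) = true
    · rw [if_pos hg] at hfl
      refine ⟨l, List.mem_range.1 hl, hg, ?_⟩
      simp [pvMgs, hE, ← Option.some_inj.1 hfl]
    · rw [if_neg hg] at hfl; cases hfl

-- the reference state's lengths strictly decrease, so the head bounds every good suffix
theorem pvMgs_ge (K : Int) (p : List Int) (l : Nat)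
    (hl : l < p.length) (hg : pvGood K 0 (p.drop l) = true) :
    (p.length : Int) - (l : Int) ≤ pvMgs K p := by
  have hmem : (pvOrAcc 0 (p.drop l), (p.length : Int) - (l : Int)) ∈ pvEstate K p := by
    unfold pvEstate
    exact List.mem_filterMap.2 ⟨l, List.mem_range.2 hl, by rw [if_pos hg]⟩
  have hpw : (pvEstate K p).Pairwise (fun u v : Int × Int => v.2 < u.2) := by
    unfold pvEstate
    rw [List.pairwise_filterMap]
    apply List.Pairwise.imp ?_ (List.pairwise_lt_range (n := p.length))
    intro i j hij u hu v hv
    split at hu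
    · split at hv
      · simp only [Option.some_inj] at hu hv
        rw [← hu, ← hv]
        simp only []
        omega
      · simp at hv
    · simp at hu
  cases hE : pvEstate K p with
  | nil => rw [hE] at hmem; cases hmem
  | cons e es =>
    rw [hE] at hmem hpw
    simp only [pvMgs, hE]
    rcases List.mem_cons.1 hmem with h | h
    · rw [← h]
    · exact le_of_lt ((List.pairwise_cons.1 hpw).1 _ h)

-- A's value, rewritten through pvChain
theorem pvSolA_eq_aux (K : Int) (a : List Int) : ∀ (l : List Nat) (c : Int), 0 ≤ c →
    l.foldl (fun m i => pvInnerA K (a.drop i) 0 0 m) c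
      = l.foldl (fun m i => max m ((pvChain K 0 (a.drop i) : Int))) c := by
  intro l
  induction l with
  | nil => intro c _; rfl
  | cons i t ih =>
    intro c hc
    simp only [List.foldl_cons]
    rw [pvInnerA_eq K _ 0 0 c hc]
    simp only [zero_add]
    exact ih _ (le_trans hc (le_max_left _ _))

theorem pvSolA_eq (K : Int) (a : List Int) :
    sol_016 a K = (List.range a.length).foldl
      (fun m i => max m ((pvChain K 0 (a.drop i) : Int))) 0 := by
  unfold sol_016
  exact pvSolA_eq_aux K a _ 0 (le_refl 0)

-- ===== VERDICT (by name: the statement is the Claim_ definition above) =====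
theorem sol_016_spec : Claim_equal_sol_016 := by
  intro a K _
  unfold Spec_sol_016 sol_016_alt
  rw [pvFoldB_eq]
  show sol_016 a K = pvM K a
  unfold pvM
  rw [pvSolA_eq]
  apply le_antisymm
  · -- every chain value is witnessed as a good suffix of some prefix
    apply pvFoldMax_le
    · exact pvFoldMax_init _ _ 0
    · intro i hi
      have hi' : i < a.length := List.mem_range.1 hi
      set c := pvChain K 0 (a.drop i) with hc
      rcases Nat.eq_zero_or_pos c with h0 | hpos
      · rw [h0]
        exact pvFoldMax_init _ _ 0
      · have hcl : c ≤ (a.drop i).length := pvChain_le_length K _ _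
        rw [List.length_drop] at hcl
        have hp : (a.take (i + c)).length = i + c := by
          rw [List.length_take]; omega
        have hdrop : (a.take (i + c)).drop i = (a.drop i).take c := by
          rw [List.drop_take]
          congr 1
          omega
        have hgood : pvGood K 0 ((a.take (i + c)).drop i) = true := by
          rw [hdrop, hc]
          exact pvGood_take_chain K _ _
        have hmgs := pvMgs_ge K (a.take (i + c)) i (by omega) hgood
        rw [hp] at hmgs
        have hfold := pvFoldMax_mem (fun j => pvMgs K (a.take (j + 1))) (i + c - 1)
          (List.range a.length) 0 (List.mem_range.2 (by omega))
        have htk : a.take ((i + c - 1) + 1) = a.take (i + c) := by congr 1; omega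
        calc (c : Int) ≤ pvMgs K (a.take (i + c)) := by push_cast at hmgs ⊢; omega
          _ ≤ _ := by simpa [htk] using hfold
  · -- every good suffix is bounded by the chain from its start
    apply pvFoldMax_le
    · exact pvFoldMax_init _ _ 0
    · intro j hj
      have hj' : j < a.length := List.mem_range.1 hj
      rcases pvMgs_cases K (a.take (j + 1)) with h0 | ⟨l, hl, hg, heq⟩
      · rw [h0]
        exact pvFoldMax_init _ _ 0
      · have hp : (a.take (j + 1)).length = j + 1 := by rw [List.length_take]; omega
        rw [hp] at hl
        have hdrop : (a.take (j + 1)).drop l = (a.drop l).take (j + 1 - l) := List.drop_take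
        have hch : j + 1 - l ≤ pvChain K 0 (a.drop l) := by
          apply pvChain_ge K _ _ _ (by rw [List.length_drop]; omega)
          rw [← hdrop]
          exact hg
        have hfold := pvFoldMax_mem (fun i => ((pvChain K 0 (a.drop i) : Nat) : Int)) l
          (List.range a.length) 0 (List.mem_range.2 (by omega))
        calc (fun j => pvMgs K (a.take (j + 1))) j
              = ((j + 1 : Nat) : Int) - (l : Int) := by simp only [heq, hp]
          _ ≤ (pvChain K 0 (a.drop l) : Int) := by push_cast; omega
          _ ≤ _ := by simpa using hfold
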